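-- pv_equiv track=rewrite | github.com/virtual-labs/tool-doc-search | document_parser.py | remove_header
-- ===== SOURCE A (Python) =====
-- def remove_header(page_md):
--     md_lines = page_md.split("\n")
--
--     body_lines = []
--     in_body = False
--     for mdl in md_lines:
--         if len(mdl) > 0 and mdl[0] == "#":
--             in_body = True
--         if in_body:
--             body_lines.append(mdl)
--     page_md = "\n".join(body_lines)
--     return page_md
-- ===== SOURCE B (Python) =====
-- def remove_header(page_md):
--     lines = page_md.split("\n")
--     idx = next((i for i, l in enumerate(lines) if l.startswith("#")), None)
--     return "" if idx is None else "\n".join(lines[idx:])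
-- ===== Notes on version B (the rewrite author's own statement) =====
-- stated objective: simpler
-- what changed: Replaced the flag-driven accumulate loop by locating the index of the first header line and slicing the tail of the line list (empty string if none).
import Mathlib
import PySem

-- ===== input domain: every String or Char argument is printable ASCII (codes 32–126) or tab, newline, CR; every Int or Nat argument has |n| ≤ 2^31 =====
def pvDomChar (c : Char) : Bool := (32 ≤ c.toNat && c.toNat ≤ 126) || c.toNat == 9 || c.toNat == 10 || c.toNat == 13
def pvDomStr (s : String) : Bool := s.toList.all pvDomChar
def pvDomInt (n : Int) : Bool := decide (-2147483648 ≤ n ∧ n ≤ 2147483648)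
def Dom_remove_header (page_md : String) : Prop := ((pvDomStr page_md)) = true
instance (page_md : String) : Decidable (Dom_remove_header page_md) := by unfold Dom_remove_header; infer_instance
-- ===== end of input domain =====

-- B replaces A's flag-driven accumulate loop by "find the index of the first header line, then slice the tail"; objective: simpler.

-- ===== PORT A =====
def remove_header (page_md : String) : String :=
  let md_lines := (PySem.Str.split? page_md "\n").getD []   -- sep "\n" ≠ "", so split? is always some
  let st := md_lines.foldl (fun (s : Bool × List String) mdl =>
    let in_body := if PySem.Str.len mdl > 0 && (PySem.Str.pyGet? mdl 0 == some '#') then true else s.1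
    (in_body, if in_body then s.2 ++ [mdl] else s.2)) (false, [])
  PySem.Str.join "\n" st.2

-- ===== PORT B =====
def remove_header_alt (page_md : String) : String :=
  let lines := (PySem.Str.split? page_md "\n").getD []   -- sep "\n" ≠ "", so split? is always some
  match lines.findIdx? (fun l => PySem.Str.startswith l "#") with
  | none => ""
  | some i => PySem.Str.join "\n" (lines.drop i)

-- ===== PRECONDITION & SPEC =====
def Spec_remove_header (page_md : String) (out : String) : Prop := out = remove_header_alt page_md
instance (page_md : String) (out : String) : Decidable (Spec_remove_header page_md out) := by unfold Spec_remove_header; infer_instance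

-- ===== CLAIM =====
def Claim_equal_remove_header : Prop := ∀ (page_md : String), Dom_remove_header page_md → Spec_remove_header page_md (remove_header page_md)

-- ===== LEMMAS AND PROOFS =====

-- A's header test on a line equals startswith "#"
lemma test_eq_startswith (l : String) :
    (PySem.Str.len l > 0 && (PySem.Str.pyGet? l 0 == some '#')) = PySem.Str.startswith l "#" := by
  cases h : l.toList with
  | nil => simp [h, PySem.List.pyGet?, PySem.Chars.startswith]
  | cons c cs =>
    simp [h, PySem.List.pyGet?, PySem.List.pyIdx?, PySem.Chars.startswith, List.isPrefixOf,
          eq_comm]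

-- once in_body is true, the loop appends every remaining line
lemma foldl_inbody_true (ls : List String) (acc : List String) :
    ls.foldl (fun (s : Bool × List String) mdl =>
      let in_body := if PySem.Str.startswith mdl "#" then true else s.1
      (in_body, if in_body then s.2 ++ [mdl] else s.2)) (true, acc) = (true, acc ++ ls) := by
  induction ls generalizing acc with
  | nil => simp
  | cons x xs ih =>
    have hstep : (let in_body := if PySem.Str.startswith x "#" = true then true else (true, acc).1;
        (in_body, if in_body = true then (true, acc).2 ++ [x] else (true, acc).2)) = (true, acc ++ [x]) := by
      cases hst : PySem.Str.startswith x "#" <;> simp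
    rw [List.foldl_cons, hstep, ih]
    simp

-- the main loop characterisation against find-then-drop
lemma loop_eq_find (ls : List String) :
    (ls.foldl (fun (s : Bool × List String) mdl =>
      let in_body := if PySem.Str.startswith mdl "#" then true else s.1
      (in_body, if in_body then s.2 ++ [mdl] else s.2)) (false, [])).2 =
    (match ls.findIdx? (fun l => PySem.Str.startswith l "#") with
     | none => []
     | some i => ls.drop i) := by
  induction ls with
  | nil => simp
  | cons x xs ih =>
    rw [List.foldl_cons, List.findIdx?_cons]
    by_cases h : PySem.Str.startswith x "#" = true
    · have hstep : (let in_body := if PySem.Str.startswith x "#" = true then true else (false, ([] : List String)).1;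
          (in_body, if in_body = true then (false, ([] : List String)).2 ++ [x] else (false, ([] : List String)).2)) = (true, [x]) := by
        have hC : PySem.Chars.startswith x.toList ['#'] = true := by simpa using h
        simp [hC]
      rw [hstep, foldl_inbody_true]
      have hC : PySem.Chars.startswith x.toList ['#'] = true := by simpa using h
      simp [hC]
    · have h' : PySem.Str.startswith x "#" = false := by simpa using h
      have hstep : (let in_body := if PySem.Str.startswith x "#" = true then true else (false, ([] : List String)).1;
          (in_body, if in_body = true then (false, ([] : List String)).2 ++ [x] else (false, ([] : List String)).2)) = (false, []) := by
        have hC : PySem.Chars.startswith x.toList ['#'] = false := by simpa using h'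
        simp [hC]
      rw [hstep, ih]
      have hC : PySem.Chars.startswith x.toList ['#'] = false := by simpa using h'
      cases hf : xs.findIdx? (fun l => PySem.Str.startswith l "#") <;>
        simp_all

-- ===== VERDICT =====
theorem remove_header_spec : Claim_equal_remove_header := by
  intro page_md _
  unfold Spec_remove_header remove_header remove_header_alt
  have hfun : (fun (s : Bool × List String) mdl =>
      let in_body := if PySem.Str.len mdl > 0 && (PySem.Str.pyGet? mdl 0 == some '#') then true else s.1
      (in_body, if in_body then s.2 ++ [mdl] else s.2)) =
      (fun (s : Bool × List String) mdl =>
      let in_body := if PySem.Str.startswith mdl "#" then true else s.1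
      (in_body, if in_body then s.2 ++ [mdl] else s.2)) := by
    funext s mdl; rw [test_eq_startswith]
  simp only [hfun]
  rw [loop_eq_find]
  cases hf : ((PySem.Str.split? page_md "\n").getD []).findIdx? (fun l => PySem.Str.startswith l "#") with
  | none => simp [hf, PySem.Str.join, PySem.Chars.join, List.intercalate]
  | some i => simp [hf]
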